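-- pv_equiv track=rewrite | github.com/alexandraback/datacollection | solutions_5751500831719424_1/Python/jtidor/probA.py | count
-- ===== SOURCE A (Python) =====
-- def count(s,red):
--     l=[0]
--     i=0
--     j=0
--     while i<len(red) and j<len(s):
--         if s[j]==red[i]:
--             l[i]+=1
--             j+=1
--         else:
--             i+=1
--             l.append(0)
--     return l
-- ===== SOURCE B (Python) =====
-- def count(s, red):
--     # pass 1: run-length encode s into a list of (char, run length) pairs
--     runs = []
--     for ch in s:
--         if runs and runs[-1][0] == ch:
--             runs[-1] = (ch, runs[-1][1] + 1)
--         else: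
--             runs.append((ch, 1))
--     if not runs:
--         return [0]
--     # pass 2: match the run list against the pattern
--     l = []
--     r = 0
--     for c in red:
--         if runs[r][0] == c:
--             l.append(runs[r][1])
--             r += 1
--             if r == len(runs):
--                 return l
--         else:
--             l.append(0)
--     l.append(0)
--     return l
-- ===== Notes on version B (the rewrite author's own statement) =====
-- stated objective: alternative
-- what changed: Replaced A's fused two-pointer character-by-character loop with two staged passes over a new data structure: first run-length encode s into a list of (char, count) pairs, then match that run list against the pattern, consuming one whole run per matching pattern character.
import Mathlib
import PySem

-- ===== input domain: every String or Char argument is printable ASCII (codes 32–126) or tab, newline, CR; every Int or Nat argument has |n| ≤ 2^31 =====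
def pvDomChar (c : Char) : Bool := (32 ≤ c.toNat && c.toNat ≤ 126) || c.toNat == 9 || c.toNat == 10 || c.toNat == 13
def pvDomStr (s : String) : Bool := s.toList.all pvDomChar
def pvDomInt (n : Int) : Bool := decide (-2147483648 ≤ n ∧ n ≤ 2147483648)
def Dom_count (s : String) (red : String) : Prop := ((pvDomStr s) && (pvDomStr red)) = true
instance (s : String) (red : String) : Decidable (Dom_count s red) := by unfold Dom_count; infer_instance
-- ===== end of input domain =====

-- B replaces A's fused two-pointer loop with two staged passes: run-length encode s,
-- then match the run list against the pattern (objective: alternative, same cost).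

-- ===== PORT A =====
-- l[i] += 1 (i is always in range: l has length i+1 throughout A's loop)
def incAt : List Int → Nat → List Int
  | [], _ => []
  | x :: xs, 0 => (x + 1) :: xs
  | x :: xs, n + 1 => x :: incAt xs n

def countLoop (s red : List Char) (i j : Nat) (l : List Int) : List Int :=
  if h : i < red.length ∧ j < s.length then
    if s[j]'h.2 = red[i]'h.1 then
      countLoop s red i (j + 1) (incAt l i)
    else
      countLoop s red (i + 1) j (l ++ [0])
  else l
termination_by (red.length - i) + (s.length - j)
decreasing_by all_goals omega

def count (s : String) (red : String) : List Int :=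
  countLoop s.toList red.toList 0 0 [0]

-- ===== PORT B =====
-- one step of pass 1: extend the last run or start a new one (Source B's first for loop body)
def pushRun (runs : List (Char × Int)) (ch : Char) : List (Char × Int) :=
  match runs.getLast? with
  | some (lc, ln) => if lc = ch then runs.dropLast ++ [(ch, ln + 1)] else runs ++ [(ch, 1)]
  | none => [(ch, 1)]

-- pass 2: Source B's second for loop with run pointer r (r < runs.length at every
-- runs[r] access in Source B thanks to the early return; getD only makes this total)
def matchRuns (runs : List (Char × Int)) (cs : List Char) (r : Nat) (l : List Int) : List Int :=
  match cs with
  | [] => l ++ [0]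
  | c :: rest =>
    let p := runs.getD r ('a', 0)
    if p.1 = c then
      if r + 1 = runs.length then l ++ [p.2]
      else matchRuns runs rest (r + 1) (l ++ [p.2])
    else matchRuns runs rest r (l ++ [0])

def count_alt (s : String) (red : String) : List Int :=
  let runs := s.toList.foldl pushRun []
  if runs = [] then [0] else matchRuns runs red.toList 0 []

-- ===== PRECONDITION & SPEC =====
def Spec_count (s : String) (red : String) (out : List Int) : Prop := out = count_alt s red
instance (s : String) (red : String) (out : List Int) : Decidable (Spec_count s red out) := by unfold Spec_count; infer_instance

-- ===== CLAIM (what is proved, stated in full; the proofs are below) =====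
def Claim_equal_count : Prop := ∀ (s : String) (red : String), Dom_count s red → Spec_count s red (count s red)

-- ===== LEMMAS AND PROOFS =====

-- A's inner matching steps, expressed as one run-counting scan (proof-side only)
def runCount (s : List Char) (c : Char) (j : Nat) (k : Int) : Nat × Int :=
  if h : j < s.length then
    if s[j]'h = c then runCount s c (j + 1) (k + 1) else (j, k)
  else (j, k)
termination_by s.length - j
decreasing_by omega

-- head-recursive run-length encoding (proof-side reference for pass 1)
def rleR : List Char → List (Char × Int)
  | [] => []
  | c :: t =>
    match rleR t with
    | (c', n) :: rest => if c' = c then (c, n + 1) :: rest else (c, 1) :: (c', n) :: rest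
    | [] => [(c, 1)]

def combineRun (p : Char × Int) (rs : List (Char × Int)) : List (Char × Int) :=
  match rs with
  | (c', n') :: rest => if c' = p.1 then (p.1, n' + p.2) :: rest else p :: rs
  | [] => [p]

theorem incAt_append (acc : List Int) (k : Int) :
    incAt (acc ++ [k]) acc.length = acc ++ [k + 1] := by
  induction acc with
  | nil => simp [incAt]
  | cons x xs ih => simpa [incAt] using ih

-- one pass of A's loop over a maximal run equals runCount, then A continues at the next pattern char
theorem countLoop_run (s red : List Char) (i j : Nat) (acc : List Int) (k : Int)
    (hi : i < red.length) (ha : acc.length = i) :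
    countLoop s red i j (acc ++ [k]) =
      (if (runCount s (red[i]'hi) j k).1 < s.length
       then countLoop s red (i + 1) (runCount s (red[i]'hi) j k).1
              ((acc ++ [(runCount s (red[i]'hi) j k).2]) ++ [0])
       else acc ++ [(runCount s (red[i]'hi) j k).2]) := by
  fun_induction runCount s (red[i]'hi) j k with
  | case1 j k h hc ih =>
      rw [countLoop]
      have : (if h' : i < red.length ∧ j < s.length then
          if s[j]'h'.2 = red[i]'h'.1 then countLoop s red i (j+1) (incAt (acc ++ [k]) i)
          else countLoop s red (i+1) j ((acc ++ [k]) ++ [0])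
        else acc ++ [k]) = countLoop s red i (j+1) (incAt (acc ++ [k]) i) := by
        rw [dif_pos ⟨hi, h⟩, if_pos hc]
      rw [this]; subst ha; rw [incAt_append]; exact ih
  | case2 j k h hc =>
      rw [countLoop, dif_pos ⟨hi, h⟩, if_neg hc, if_pos h]
  | case3 j k h =>
      rw [countLoop, dif_neg (by omega), if_neg (by omega)]

theorem rleR_cons (c : Char) (t : List Char) :
    rleR (c :: t) = combineRun (c, 1) (rleR t) := by
  simp only [rleR, combineRun]
  match h : rleR t with
  | [] => rfl
  | (c', n) :: rest => by_cases hc : c' = c <;> simp [hc]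

theorem foldl_pushRun (t : List Char) (acc : List (Char × Int)) (lc : Char) (ln : Int) :
    t.foldl pushRun (acc ++ [(lc, ln)]) = acc ++ combineRun (lc, ln) (rleR t) := by
  induction t generalizing acc lc ln with
  | nil => simp [rleR, combineRun]
  | cons ch t' ih =>
      have hpush : pushRun (acc ++ [(lc, ln)]) ch =
          if lc = ch then acc ++ [(ch, ln + 1)] else (acc ++ [(lc, ln)]) ++ [(ch, 1)] := by
        simp [pushRun]
      by_cases hc : lc = ch
      · subst hc
        rw [List.foldl_cons, hpush, if_pos rfl, ih, rleR_cons]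
        congr 1
        match h : rleR t' with
        | [] => simp [combineRun]; ring
        | (c', n) :: rest =>
            by_cases h' : c' = lc <;> simp [combineRun, h'] <;> ring_nf
      · rw [List.foldl_cons, hpush, if_neg hc, ih, rleR_cons]
        have : combineRun (lc, ln) (combineRun (ch, 1) (rleR t')) =
            (lc, ln) :: combineRun (ch, 1) (rleR t') := by
          match h : rleR t' with
          | [] => simp [combineRun]; exact fun h => hc h.symm
          | (c', n) :: rest =>
              by_cases h' : c' = ch <;> simp [combineRun, h'] <;>
                exact fun h => hc h.symm
        rw [this]; simp

theorem rle_eq (t : List Char) : t.foldl pushRun [] = rleR t := by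
  match t with
  | [] => rfl
  | c :: t' =>
      have : pushRun [] c = [] ++ [(c, 1)] := by simp [pushRun]
      rw [List.foldl_cons, this, foldl_pushRun, rleR_cons]; simp

-- structural characterisation of rleR: head run is a maximal nonempty run
theorem rleR_spec (t : List Char) :
    (rleR t = [] → t = []) ∧
    (∀ c n rest, rleR t = (c, n) :: rest →
      ∃ (k : Nat) (u : List Char), 0 < k ∧ n = (k : Int) ∧ t = List.replicate k c ++ u ∧
        rleR u = rest ∧ u.head? ≠ some c) := by
  induction t with
  | nil => exact ⟨fun _ => rfl, fun c n rest h => by simp [rleR] at h⟩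
  | cons ch t' ih =>
      constructor
      · intro h
        rw [rleR] at h
        match h' : rleR t' with
        | [] => rw [h'] at h; simp at h
        | (c', n') :: rest' => rw [h'] at h; by_cases hc : c' = ch <;> simp [hc] at h
      · intro c n rest h
        rw [rleR] at h
        match h' : rleR t' with
        | [] =>
            rw [h'] at h
            simp only [List.cons.injEq, Prod.mk.injEq] at h
            obtain ⟨⟨hc, hn⟩, hr⟩ := h
            refine ⟨1, t', by omega, by omega, ?_, ?_, ?_⟩
            · simp [hc]
            · rw [ih.1 h', ← hr]; rfl
            · rw [ih.1 h']; simp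
        | (c', n') :: rest' =>
            rw [h'] at h
            dsimp only at h
            by_cases hc : c' = ch
            · rw [if_pos hc] at h
              simp only [List.cons.injEq, Prod.mk.injEq] at h
              obtain ⟨⟨hcc, hn⟩, hr⟩ := h
              obtain ⟨k, u, hk, hn', ht, hu, hh⟩ := ih.2 c' n' rest' h'
              refine ⟨k + 1, u, by omega, by omega, ?_, by rw [hu, hr], ?_⟩
              · rw [ht, hc, ← hcc, List.replicate_succ]; rfl
              · rw [← hcc, ← hc]; exact hh
            · rw [if_neg hc] at h
              simp only [List.cons.injEq, Prod.mk.injEq] at h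
              obtain ⟨⟨hcc, hn⟩, hr⟩ := h
              refine ⟨1, t', by omega, by omega, by simp [hcc], by rw [← hr]; exact h', ?_⟩
              intro habs
              match t', h', habs with
              | ch2 :: t'', h', habs =>
                  obtain ⟨k2, u2, hk2, _, ht2, _, _⟩ := ih.2 c' n' rest' h'
                  have : ch2 = c' := by
                    have := ht2
                    match k2, hk2, this with
                    | k2 + 1, _, this => rw [List.replicate_succ] at this; exact (List.cons.injEq _ _ _ _ ▸ this).1
                  have habs' : ch2 = c := by simpa using habs
                  exact hc (by rw [← this, habs', ← hcc])

theorem runCount_stop (s : List Char) (c : Char) (j : Nat) (m : Int)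
    (h : s[j]? ≠ some c) : runCount s c j m = (j, m) := by
  rw [runCount]
  by_cases hj : j < s.length
  · rw [dif_pos hj, if_neg (by rw [List.getElem?_eq_getElem hj] at h; simpa using h)]
  · rw [dif_neg hj]

theorem runCount_run (s : List Char) (c : Char) (j k : Nat) (m : Int) (u : List Char)
    (hd : s.drop j = List.replicate k c ++ u) (hu : u.head? ≠ some c) :
    runCount s c j m = (j + k, m + (k : Int)) := by
  induction k generalizing j m with
  | zero =>
      simp only [List.replicate, List.nil_append] at hd
      have : s[j]? ≠ some c := by
        rw [← List.head?_drop, hd]; exact hu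
      rw [runCount_stop s c j m this]; simp
  | succ k ih =>
      rw [List.replicate_succ, List.cons_append] at hd
      have hj : j < s.length := by
        by_contra h
        rw [List.drop_eq_nil_of_le (by omega)] at hd
        exact (List.cons_ne_nil _ _) hd.symm
      have hsj : s[j]'hj = c := by
        have : s[j]? = some c := by rw [← List.head?_drop, hd]; rfl
        rw [List.getElem?_eq_getElem hj] at this; simpa using this
      rw [runCount, dif_pos hj, if_pos hsj]
      have hd' : s.drop (j + 1) = List.replicate k c ++ u := by
        have := congrArg List.tail hd
        rwa [List.tail_drop, List.tail_cons] at this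
      rw [ih (j + 1) (m + 1) hd']
      simp only [Prod.mk.injEq]
      exact ⟨by omega, by push_cast; ring⟩

theorem countLoop_eq_matchRuns (s red : List Char) (cs : List Char) :
    ∀ (i j r : Nat) (acc : List Int) (runs : List (Char × Int)),
    red.drop i = cs → acc.length = i → j ≤ s.length →
    rleR (s.drop j) = runs.drop r → r < runs.length →
    countLoop s red i j (acc ++ [0]) = matchRuns runs cs r acc := by
  induction cs with
  | nil =>
      intro i j r acc runs hdrop ha hj hr hrlt
      have : red.length ≤ i := by have := List.drop_eq_nil_iff.mp hdrop; omega
      rw [countLoop, dif_neg (by omega)]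
      rfl
  | cons c rest ih =>
      intro i j r acc runs hdrop ha hj hr hrlt
      obtain ⟨rc, rn, hq⟩ : ∃ rc rn, runs[r]'hrlt = (rc, rn) := ⟨_, _, rfl⟩
      have hdr : runs.drop r = (rc, rn) :: runs.drop (r + 1) := by
        rw [← hq]; exact (List.getElem_cons_drop hrlt).symm
      have hgetD : runs.getD r ('a', 0) = (rc, rn) := by
        rw [List.getD_eq_getElem _ _ hrlt, hq]
      rw [hdr] at hr
      have hi : i < red.length := by
        by_contra h
        rw [List.drop_eq_nil_of_le (by omega)] at hdrop
        exact (List.cons_ne_nil _ _) hdrop.symm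
      have hget : red[i]'hi = c ∧ red.drop (i + 1) = rest := by
        have h2 : red.drop i = red[i]'hi :: red.drop (i + 1) := (List.getElem_cons_drop hi).symm
        rw [hdrop] at h2
        simp only [List.cons.injEq] at h2
        exact ⟨h2.1.symm, h2.2.symm⟩
      obtain ⟨k, u, hk, hn, ht, hu, hh⟩ := (rleR_spec (s.drop j)).2 rc rn (runs.drop (r + 1)) hr
      have hlen : (s.drop j).length = k + u.length := by rw [ht]; simp
      have hjk : j + k ≤ s.length := by
        have := List.length_drop (l := s) (i := j); omega
      rw [countLoop_run s red i j acc 0 hi ha, hget.1]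
      by_cases hc : rc = c
      · subst hc
        rw [runCount_run s rc j k 0 u ht hh]
        have hdropjk : s.drop (j + k) = u := by
          rw [← List.drop_drop, ht]
          have : (List.replicate k rc).length = k := by simp
          rw [List.drop_append_of_le_length (by simp), List.drop_replicate]
          simp
        rw [matchRuns]
        simp only [hgetD]
        by_cases hrt : r + 1 = runs.length
        · have hdnil : runs.drop (r + 1) = [] := List.drop_eq_nil_of_le (by omega)
          have hunil : u = [] := by
            rw [hdnil] at hu
            by_contra habs
            match u, habs, hu, hh with
            | uc :: u', _, hu, hh =>
                rw [rleR] at hu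
                match h2 : rleR u' with
                | [] => rw [h2] at hu; simp at hu
                | q :: qs => rw [h2] at hu; by_cases hq : q.1 = uc <;> simp [hq] at hu
          have : j + k = s.length := by
            rw [hunil] at hlen; simp at hlen
            have := List.length_drop (l := s) (i := j); omega
          rw [if_neg (by simp; omega)]
          simp [hrt, hn]
        · have hune : runs.drop (r + 1) ≠ [] := by
            intro habs
            have := List.drop_eq_nil_iff.mp habs; omega
          have hune' : u ≠ [] := by
            intro habs; rw [habs] at hu; exact hune hu.symm
          have hlt : j + k < s.length := by
            have : u.length ≠ 0 := fun h0 => hune' (List.eq_nil_of_length_eq_zero h0)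
            have := List.length_drop (l := s) (i := j); omega
          rw [if_pos hlt, if_neg hrt]
          have hrlt' : r + 1 < runs.length := by omega
          have := ih (i + 1) (j + k) (r + 1) (acc ++ [(k : Int)]) runs hget.2
            (by simp [ha]) (by omega) (by rw [hdropjk]; exact hu) hrlt'
          rw [hn]
          simpa using this
      · have hsj : s[j]? = some rc := by
          rw [← List.head?_drop, ht]
          match k, hk with
          | k + 1, _ => rw [List.replicate_succ]; rfl
        have hj' : j < s.length := by
          by_contra h
          rw [List.getElem?_eq_none_iff.mpr (by omega)] at hsj; simp at hsj
        rw [runCount_stop s c j 0 (by rw [hsj]; intro h2; exact hc (by simpa using h2))]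
        rw [if_pos hj', matchRuns]
        simp only [hgetD, if_neg hc]
        exact ih (i + 1) j r (acc ++ [0]) runs hget.2
          (by simp [ha]) (by omega) (by rw [hdr]; exact hr) hrlt

-- ===== VERDICT (by name: the statement is the Claim_ definition above) =====
theorem count_spec : Claim_equal_count := by
  intro s red _
  unfold Spec_count count count_alt
  rw [rle_eq]
  by_cases h : rleR s.toList = []
  · rw [if_pos h]
    have hs : s.toList = [] := (rleR_spec s.toList).1 h
    rw [countLoop, dif_neg (by rw [hs]; simp)]
  · rw [if_neg h]
    have hlen : 0 < (rleR s.toList).length := by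
      cases h' : rleR s.toList with
      | nil => exact absurd h' h
      | cons p q => simp
    have := countLoop_eq_matchRuns s.toList red.toList red.toList 0 0 0 [] (rleR s.toList)
      (by simp) rfl (by omega) (by simp) hlen
    simpa using this
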